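-- pv_equiv track=rewrite | github.com/jvaldesh/data_science | 01_introduccion_a_la_programacion_con_python/S04/letra_i.py | letra_i
-- ===== SOURCE A (Python) =====
-- def letra_i(n):
--     letra = ""
--
--     header = "*" * n
--     letra = header
--
--     for i in range(n-2):
--         line = "\n"
--
--         if(n%2 == 0):
--             mitad = int(n/2) - 1
--         else:
--             mitad = int(n/2)
--
--         line += " " * mitad
--
--         if(n%2 == 0):
--             line += "**"
--         else:
--             line += "*"
--
--         letra += line
--
--     letra += "\n" + header
--
--     return letra
-- ===== SOURCE B (Python) =====
-- def letra_i(n):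
--     # Rasterize the letter into one flat byte buffer: allocate a blank canvas
--     # (middle lines all have width n//2 + 1, so the body is periodic with
--     # period w + 1 counting the newline) and paint the newlines and the stem
--     # column(s) with strided slice assignments; no per-line loop.
--     m = max(n - 2, 0)                  # number of middle lines
--     head = b'*' * max(n, 0)
--     if m == 0:
--         return (head + b'\n' + head).decode()
--     w = n // 2 + 1                     # width of a middle line
--     mitad = (n - 1) // 2               # leading spaces before the stem
--     s = w - mitad                      # stem thickness (1 or 2 stars)
--     p = w + 1                          # period of the body incl. newline
--     L = m * p
--     buf = bytearray(b' ') * (n + L + 1 + n)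
--     buf[:n] = head
--     buf[-(n + 1):] = b'\n' + head
--     buf[n:n + L:p] = b'\n' * m
--     for j in range(s):
--         buf[n + 1 + mitad + j:n + L:p] = b'*' * m
--     return buf.decode()
-- ===== Notes on version B (the rewrite author's own statement) =====
-- stated objective: alternative
-- what changed: B rasterizes the letter into a single flat byte buffer and paints the newlines and the stem column(s) with strided slice assignments over the periodic body, instead of A's per-line accumulator loop that rebuilds each middle line.
import Mathlib
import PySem

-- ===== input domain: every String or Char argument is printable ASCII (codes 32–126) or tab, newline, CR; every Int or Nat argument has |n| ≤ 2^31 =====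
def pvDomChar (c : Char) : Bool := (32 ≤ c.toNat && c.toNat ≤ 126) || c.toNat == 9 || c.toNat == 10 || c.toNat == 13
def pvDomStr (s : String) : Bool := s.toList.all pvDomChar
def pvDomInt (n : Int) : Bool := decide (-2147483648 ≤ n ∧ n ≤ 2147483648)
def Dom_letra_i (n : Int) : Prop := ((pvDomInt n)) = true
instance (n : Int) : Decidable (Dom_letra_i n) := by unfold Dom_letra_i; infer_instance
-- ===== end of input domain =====

-- B rasterizes the letter into one flat character buffer and paints newlines
-- and the stem with strided slice writes (the body is periodic), instead of
-- A's per-line accumulator loop (objective: alternative).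

-- ===== PORT A =====
def letra_i (n : Int) : String :=
  -- letra = ""; header = "*" * n; letra = header
  let header : List Char := PySem.List.pyRepeat ['*'] n
  -- for i in range(n-2): build line and append it to letra
  let letra : List Char := (PySem.List.pyRange 0 (n - 2) 1).foldl (fun letra _i =>
    let line : List Char := ['\n']
    -- int(n/2) truncates toward zero: PySem.Int.truncdiv (exact for |n| ≤ 2^31)
    let mitad : Int := if PySem.Int.mod n 2 = 0 then PySem.Int.truncdiv n 2 - 1 else PySem.Int.truncdiv n 2
    let line : List Char := line ++ PySem.List.pyRepeat [' '] mitad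
    let line : List Char := if PySem.Int.mod n 2 = 0 then line ++ ['*', '*'] else line ++ ['*']
    letra ++ line) header
  String.ofList (letra ++ '\n' :: header)

-- ===== PORT B =====
-- strided slice assignment buf[start:stop:step] = c * <count> with 0 < step and a
-- right-hand side of exactly matching count (as in Source B): position i is painted
-- iff start ≤ i < stop and (i - start) % step == 0; exact for these writes.
def strideSet (buf : List Char) (start stop step : Int) (c : Char) : List Char :=
  buf.zipIdx.map (fun x =>
    if start ≤ (x.2 : Int) ∧ (x.2 : Int) < stop ∧ PySem.Int.mod ((x.2 : Int) - start) step = 0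
    then c else x.1)

def letra_i_alt (n : Int) : String :=
  let m : Int := max (n - 2) 0
  let head : List Char := List.replicate (max n 0).toNat '*'
  if m = 0 then String.ofList (head ++ '\n' :: head)
  else
    let w : Int := PySem.Int.floordiv n 2 + 1
    let mitad : Int := PySem.Int.floordiv (n - 1) 2
    let s : Int := w - mitad
    let p : Int := w + 1
    let L : Int := m * p
    let size : Int := n + L + 1 + n
    let buf : List Char := List.replicate size.toNat ' '
    -- buf[:n] = head  (contiguous slice assignment of matching length)
    let buf : List Char := head ++ buf.drop n.toNat
    -- buf[-(n+1):] = '\n' + head  (contiguous slice assignment of matching length)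
    let buf : List Char := buf.take (buf.length - (n.toNat + 1)) ++ '\n' :: head
    -- buf[n : n+L : p] = '\n' * m
    let buf : List Char := strideSet buf n (n + L) p '\n'
    -- for j in range(s): buf[n+1+mitad+j : n+L : p] = '*' * m
    let buf : List Char := (PySem.List.pyRange 0 s 1).foldl
        (fun b j => strideSet b (n + 1 + mitad + j) (n + L) p '*') buf
    String.ofList buf

-- ===== PRECONDITION & SPEC =====
def Spec_letra_i (n : Int) (out : String) : Prop := out = letra_i_alt n
instance (n : Int) (out : String) : Decidable (Spec_letra_i n out) := by unfold Spec_letra_i; infer_instance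

-- ===== CLAIM =====
def Claim_equal_letra_i : Prop := ∀ (n : Int), Dom_letra_i n → Spec_letra_i n (letra_i n)

-- ===== LEMMAS AND PROOFS =====

-- appending the same line on every iteration is flattened replication
theorem foldl_const_append {α β : Type} (line : List α) :
    ∀ (l : List β) (init : List α),
      l.foldl (fun acc _ => acc ++ line) init = init ++ (List.replicate l.length line).flatten
  | [], init => by simp
  | _ :: l, init => by
    simp [List.foldl, foldl_const_append line l, List.replicate_succ, List.append_assoc]

theorem strideSet_getElem? (buf : List Char) (start stop step : Int) (c : Char) (i : Nat) :
    (strideSet buf start stop step c)[i]?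
      = buf[i]?.map (fun ch =>
          if start ≤ (i : Int) ∧ (i : Int) < stop ∧ PySem.Int.mod ((i : Int) - start) step = 0
          then c else ch) := by
  simp [strideSet, List.getElem?_zipIdx]
  cases buf[i]? <;> simp

-- the stem loop: every iteration paints the same character, so the result at i is
-- 'painted iff some iteration's condition holds at i'
theorem stemFold_getElem? (stop step : Int) (c : Char) (f : Int → Int) :
    ∀ (l : List Int) (acc : List Char) (i : Nat),
      (l.foldl (fun b j => strideSet b (f j) stop step c) acc)[i]?
        = acc[i]?.map (fun ch =>
            if (∃ j ∈ l, f j ≤ (i : Int) ∧ (i : Int) < stop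
                  ∧ PySem.Int.mod ((i : Int) - f j) step = 0)
            then c else ch)
  | [], acc, i => by simp
  | j :: l, acc, i => by
    rw [List.foldl_cons, stemFold_getElem? stop step c f l _ i, strideSet_getElem?]
    cases acc[i]? with
    | none => simp
    | some ch =>
      by_cases h1 : (∃ j' ∈ l, f j' ≤ (i : Int) ∧ (i : Int) < stop
          ∧ PySem.Int.mod ((i : Int) - f j') step = 0) <;>
        by_cases h2 : (f j ≤ (i : Int) ∧ (i : Int) < stop
          ∧ PySem.Int.mod ((i : Int) - f j) step = 0) <;>
        simp [h1, h2]

theorem flatten_replicate_length {α : Type} (blk : List α) :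
    ∀ (q : Nat), ((List.replicate q blk).flatten).length = q * blk.length
  | 0 => by simp
  | q + 1 => by
    simp [List.replicate_succ, flatten_replicate_length blk q, Nat.succ_mul, Nat.add_comm]

theorem flatten_replicate_getElem? {α : Type} (blk : List α) :
    ∀ (q : Nat) (i : Nat), i < q * blk.length →
      ((List.replicate q blk).flatten)[i]? = blk[i % blk.length]?
  | 0, i, hi => by omega
  | q + 1, i, hi => by
    have hp : 0 < blk.length := by
      by_contra h
      simp [Nat.le_zero.mp (Nat.not_lt.mp h)] at hi
    rw [List.replicate_succ, List.flatten_cons]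
    by_cases h : i < blk.length
    · rw [List.getElem?_append_left h, Nat.mod_eq_of_lt h]
    · rw [List.getElem?_append_right (by omega),
        flatten_replicate_getElem? blk q (i - blk.length) (by
          rw [Nat.succ_mul] at hi; omega)]
      congr 1
      exact (Nat.mod_eq_sub_mod (by omega)).symm

-- the paint condition at index i for target residue a with 0 ≤ a < step:
-- 'a ≤ i and (i - a) % step == 0' is exactly 'i % step = a' (for 0 ≤ i)
theorem paint_cond_iff (i a step : Int) (hstep : 0 < step) (hi : 0 ≤ i)
    (ha : 0 ≤ a) (hap : a < step) :
    (a ≤ i ∧ (i - a) % step = 0) ↔ i % step = a := by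
  have hmm : i % step = a % step ↔ (i - a) % step = 0 :=
    Int.emod_eq_emod_iff_emod_sub_eq_zero
  have haa : a % step = a := Int.emod_eq_of_lt ha hap
  constructor
  · rintro ⟨_, h2⟩
    rw [← haa]
    exact hmm.mpr h2
  · intro h
    refine ⟨?_, hmm.mp (by rw [h, haa])⟩
    have hdm := Int.ediv_add_emod i step
    have hq : 0 ≤ i / step := Int.ediv_nonneg hi (le_of_lt hstep)
    nlinarith [mul_nonneg (le_of_lt hstep) hq]


-- painting the blank body with one newline stripe and st stem stripes yields the
-- replicated middle line, position by position
theorem buffer_core (N mit st : Nat) (h3 : 3 ≤ N) (hst : 0 < st) :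
    (PySem.List.pyRange 0 (st : Int) 1).foldl
      (fun b j => strideSet b ((N : Int) + 1 + (mit : Int) + j)
        ((N : Int) + ((N : Int) - 2) * ((mit : Int) + (st : Int) + 1))
        ((mit : Int) + (st : Int) + 1) '*')
      (strideSet
        (List.replicate N '*' ++ List.replicate ((N - 2) * (mit + st + 1)) ' '
          ++ '\n' :: List.replicate N '*')
        (N : Int) ((N : Int) + ((N : Int) - 2) * ((mit : Int) + (st : Int) + 1))
        ((mit : Int) + (st : Int) + 1) '\n')
      = List.replicate N '*'
          ++ (List.replicate (N - 2)
                ('\n' :: (List.replicate mit ' ' ++ List.replicate st '*'))).flatten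
          ++ '\n' :: List.replicate N '*' := by
  set P : Nat := mit + st + 1 with hP
  set Lnat : Nat := (N - 2) * P with hLnat
  set mline : List Char := '\n' :: (List.replicate mit ' ' ++ List.replicate st '*') with hlinedef
  have hPpos : 0 < P := by omega
  have hLInt : ((N : Int) - 2) * ((mit : Int) + (st : Int) + 1) = (Lnat : Int) := by
    push_cast [hLnat, hP]; rw [Nat.cast_sub (by omega)]; push_cast; ring
  have hline : mline.length = P := by simp [hlinedef, hP]
  apply List.ext_getElem?
  intro i
  rw [stemFold_getElem?, strideSet_getElem?]
  have hbaseLen : (List.replicate N '*' ++ List.replicate Lnat ' '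
      ++ '\n' :: List.replicate N '*').length = N + Lnat + (1 + N) := by
    simp; omega
  have hflatLen : ((List.replicate (N - 2) mline).flatten).length = Lnat := by
    rw [flatten_replicate_length, hline, hLnat]
  by_cases hi : i < N + Lnat + (1 + N)
  swap
  · rw [List.getElem?_eq_none (by rw [hbaseLen]; omega),
      List.getElem?_eq_none (by simp [hflatLen]; omega)]
    simp
  · by_cases h1 : i < N
    · -- header region: neither stripe reaches it
      have hbase : (List.replicate N '*' ++ List.replicate Lnat ' '
          ++ '\n' :: List.replicate N '*')[i]? = some '*' := by
        rw [List.getElem?_append_left (by simp; omega),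
          List.getElem?_append_left (by simp; omega),
          List.getElem?_replicate, if_pos h1]
      have hrhs : (List.replicate N '*' ++ (List.replicate (N - 2) mline).flatten
          ++ '\n' :: List.replicate N '*')[i]? = some '*' := by
        rw [List.getElem?_append_left (by simp [hflatLen]; omega),
          List.getElem?_append_left (by simp; omega),
          List.getElem?_replicate, if_pos h1]
      have hnl : ¬ ((N : Int) ≤ (i : Int) ∧ (i : Int) < (N : Int) + ((N : Int) - 2) * ((mit : Int) + (st : Int) + 1) ∧ PySem.Int.mod ((i : Int) - (N : Int)) ((mit : Int) + (st : Int) + 1) = 0) := by rintro ⟨h, -, -⟩; omega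
      have hstem : ¬ (∃ j ∈ PySem.List.pyRange 0 (st : Int) 1,
            (N : Int) + 1 + (mit : Int) + j ≤ (i : Int) ∧ (i : Int) < (N : Int) + ((N : Int) - 2) * ((mit : Int) + (st : Int) + 1) ∧ PySem.Int.mod ((i : Int) - ((N : Int) + 1 + (mit : Int) + j)) ((mit : Int) + (st : Int) + 1) = 0) := by
        rintro ⟨j, hj, hle, -, -⟩
        rw [PySem.List.mem_pyRange_one] at hj; omega
      rw [hbase, Option.map_some, if_neg hnl, Option.map_some, if_neg hstem, hrhs]
    · by_cases h2 : i < N + Lnat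
      · -- body region
        set jn : Nat := i - N with hjndef
        set rr : Nat := jn % P with hrrdef
        have hjn : jn < Lnat := by omega
        have hrrP : rr < P := Nat.mod_lt _ hPpos
        have hbase : (List.replicate N '*' ++ List.replicate Lnat ' '
            ++ '\n' :: List.replicate N '*')[i]? = some ' ' := by
          rw [List.getElem?_append_left (by simp; omega)]
          rw [List.getElem?_append_right (by simp; omega)]
          rw [List.getElem?_replicate, if_pos (by simp; omega)]
        have hrhs : (List.replicate N '*' ++ (List.replicate (N - 2) mline).flatten
            ++ '\n' :: List.replicate N '*')[i]? = (mline[rr]?) := by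
          rw [List.getElem?_append_left (by simp [hflatLen]; omega)]
          rw [List.getElem?_append_right (by simp; omega)]
          have hidx : i - (List.replicate N '*').length = jn := by simp [hjndef]
          rw [hidx, flatten_replicate_getElem? _ _ _ (by rw [hline, ← hLnat]; exact hjn), hline]
        have hstop : (i : Int) < (N : Int) + ((N : Int) - 2) * ((mit : Int) + (st : Int) + 1) := by
          rw [hLInt]; omega
        have hmodP : ∀ (a : Int), 0 ≤ a → a < (P : Int) →
            ((PySem.Int.mod ((i : Int) - ((N : Int) + a)) ((mit : Int) + (st : Int) + 1) = 0
              ∧ (N : Int) + a ≤ (i : Int)) ↔ ((rr : Int) = a)) := by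
          intro a ha haP
          have hiN : (i : Int) - ((N : Int) + a) = (jn : Int) - a := by omega
          have hPc : ((mit : Int) + (st : Int) + 1) = (P : Int) := by push_cast [hP]; ring
          have hjP : (jn : Int) % (P : Int) = (rr : Int) := by
            rw [hrrdef, Int.natCast_mod]
          rw [PySem.Int.mod_eq_emod_of_pos (by omega), hiN, hPc]
          constructor
          · rintro ⟨hmod, hle⟩
            have := (paint_cond_iff (jn : Int) a (P : Int) (by omega) (by omega) ha haP).mp
              ⟨by omega, hmod⟩
            omega
          · intro h
            have := (paint_cond_iff (jn : Int) a (P : Int) (by omega) (by omega) ha haP).mpr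
              (by omega)
            exact ⟨this.2, by omega⟩
        have hnl : ((N : Int) ≤ (i : Int) ∧ (i : Int) < (N : Int) + ((N : Int) - 2) * ((mit : Int) + (st : Int) + 1) ∧ PySem.Int.mod ((i : Int) - (N : Int)) ((mit : Int) + (st : Int) + 1) = 0) ↔ rr = 0 := by
          constructor
          · rintro ⟨hle, -, hmod⟩
            have := (hmodP 0 le_rfl (by omega)).mp ⟨by simpa using hmod, by omega⟩
            omega
          · intro h
            have := (hmodP 0 le_rfl (by omega)).mpr (by omega)
            exact ⟨by omega, hstop, by simpa using this.1⟩
        have hstem : (∃ j ∈ PySem.List.pyRange 0 (st : Int) 1,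
            (N : Int) + 1 + (mit : Int) + j ≤ (i : Int) ∧ (i : Int) < (N : Int) + ((N : Int) - 2) * ((mit : Int) + (st : Int) + 1) ∧ PySem.Int.mod ((i : Int) - ((N : Int) + 1 + (mit : Int) + j)) ((mit : Int) + (st : Int) + 1) = 0) ↔ (1 + mit ≤ rr ∧ rr < 1 + mit + st) := by
          constructor
          · rintro ⟨j, hj, hle, -, hmod⟩
            rw [PySem.List.mem_pyRange_one] at hj
            have harr : (N : Int) + 1 + (mit : Int) + j = (N : Int) + (1 + (mit : Int) + j) := by
              ring
            rw [harr] at hle hmod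
            have := (hmodP (1 + (mit : Int) + j) (by omega) (by push_cast [hP]; omega)).mp
              ⟨hmod, hle⟩
            omega
          · rintro ⟨hlo, hhi⟩
            refine ⟨(rr : Int) - 1 - (mit : Int),
              by rw [PySem.List.mem_pyRange_one]; omega, ?_⟩
            have harr : (N : Int) + 1 + (mit : Int) + ((rr : Int) - 1 - (mit : Int))
                = (N : Int) + (rr : Int) := by ring
            rw [harr]
            have := (hmodP (rr : Int) (by omega) (by omega)).mpr rfl
            exact ⟨this.2, hstop, this.1⟩
        rw [hbase, hrhs, Option.map_some, Option.map_some]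
        simp only [hnl, hstem]
        by_cases hr0 : rr = 0
        · rw [if_pos hr0, if_neg (by omega), hr0]
          rfl
        · by_cases hrmid : rr < 1 + mit
          · rw [if_neg hr0, if_neg (by omega)]
            have hcons : mline[rr]? = (List.replicate mit ' ' ++ List.replicate st '*')[rr - 1]? := by
              rw [hlinedef, List.getElem?_cons]; simp [hr0]
            rw [hcons, List.getElem?_append_left (by simp; omega), List.getElem?_replicate,
              if_pos (by omega)]
          · rw [if_neg hr0, if_pos (by omega)]
            have hcons : mline[rr]? = (List.replicate mit ' ' ++ List.replicate st '*')[rr - 1]? := by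
              rw [hlinedef, List.getElem?_cons]; simp [hr0]
            rw [hcons, List.getElem?_append_right (by simp; omega), List.getElem?_replicate,
              if_pos (by simp; omega)]
      · -- tail region: the closing newline and footer stars; no stripe reaches it
        have hnl : ¬ ((N : Int) ≤ (i : Int) ∧ (i : Int) < (N : Int) + ((N : Int) - 2) * ((mit : Int) + (st : Int) + 1) ∧ PySem.Int.mod ((i : Int) - (N : Int)) ((mit : Int) + (st : Int) + 1) = 0) := by
          rintro ⟨-, h, -⟩; rw [hLInt] at h; omega
        have hstem : ¬ (∃ j ∈ PySem.List.pyRange 0 (st : Int) 1,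
            (N : Int) + 1 + (mit : Int) + j ≤ (i : Int) ∧ (i : Int) < (N : Int) + ((N : Int) - 2) * ((mit : Int) + (st : Int) + 1) ∧ PySem.Int.mod ((i : Int) - ((N : Int) + 1 + (mit : Int) + j)) ((mit : Int) + (st : Int) + 1) = 0) := by
          rintro ⟨j, hj, -, h, -⟩; rw [hLInt] at h; omega
        have hbase : (List.replicate N '*' ++ List.replicate Lnat ' '
            ++ '\n' :: List.replicate N '*')[i]?
            = ('\n' :: List.replicate N '*')[i - (N + Lnat)]? := by
          rw [List.getElem?_append_right (by simp; omega)]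
          congr 1
          simp
        have hrhs : (List.replicate N '*' ++ (List.replicate (N - 2) mline).flatten
            ++ '\n' :: List.replicate N '*')[i]?
            = ('\n' :: List.replicate N '*')[i - (N + Lnat)]? := by
          rw [List.getElem?_append_right (by simp [hflatLen]; omega)]
          congr 1
          simp [hflatLen]
        rw [hbase, hrhs]
        cases hx : ('\n' :: List.replicate N '*')[i - (N + Lnat)]? with
        | none => simp
        | some ch => rw [Option.map_some, if_neg hnl, Option.map_some, if_neg hstem]

theorem b_norm (N mit st : Nat) (h3 : 3 ≤ N) (hst0 : 0 < st)
    (hmit : PySem.Int.floordiv ((N : Int) - 1) 2 = (mit : Int))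
    (hw : PySem.Int.floordiv (N : Int) 2 + 1 = (mit : Int) + (st : Int)) :
    letra_i_alt (N : Int) = String.ofList
      (List.replicate N '*'
        ++ (List.replicate (N - 2)
              ('\n' :: (List.replicate mit ' ' ++ List.replicate st '*'))).flatten
        ++ '\n' :: List.replicate N '*') := by
  unfold letra_i_alt
  rw [if_neg (by omega : ¬ max ((N : Int) - 2) 0 = 0)]
  dsimp only
  rw [hmit, hw]
  have hs : ((mit : Int) + (st : Int)) - (mit : Int) = (st : Int) := by ring
  rw [hs]
  have hmax : max ((N : Int) - 2) 0 = (N : Int) - 2 := by omega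
  rw [hmax]
  set Lnat : Nat := (N - 2) * (mit + st + 1) with hLnat
  have hLI : ((N : Int) - 2) * ((mit : Int) + (st : Int) + 1) = (Lnat : Int) := by
    push_cast [hLnat]; rw [Nat.cast_sub (by omega)]; push_cast; ring
  rw [hLI]
  have hsize : ((N : Int) + (Lnat : Int) + 1 + (N : Int)).toNat = N + Lnat + 1 + N := by omega
  rw [hsize]
  have hNt : ((N : Int)).toNat = N := by omega
  rw [hNt]
  have hmaxN : (max (N : Int) 0).toNat = N := by omega
  rw [hmaxN]
  rw [List.drop_replicate]
  have hd : N + Lnat + 1 + N - N = Lnat + 1 + N := by omega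
  rw [hd]
  have hlen : (List.replicate N '*' ++ List.replicate (Lnat + 1 + N) ' ').length - (N + 1)
      = N + Lnat := by simp; omega
  rw [hlen]
  have htake : List.take (N + Lnat) (List.replicate N '*' ++ List.replicate (Lnat + 1 + N) ' ')
      = List.replicate N '*' ++ List.replicate Lnat ' ' := by
    rw [List.take_append, List.take_of_length_le (by simp),
      List.take_replicate]
    congr 2 <;> simp <;> omega
  rw [htake]
  have hcore := buffer_core N mit st h3 hst0
  rw [hLI] at hcore
  rw [hcore]

-- ===== VERDICT =====
theorem letra_i_spec : Claim_equal_letra_i := by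
  intro n _
  unfold Spec_letra_i letra_i
  by_cases hm : max (n - 2) 0 = 0
  · -- degenerate sizes: no middle lines on either side
    unfold letra_i_alt
    rw [if_pos hm]
    dsimp only
    rw [PySem.List.pyRange_one_eq_nil (by omega), List.foldl_nil,
      PySem.List.pyRepeat_singleton]
    have hmaxN : (max n 0).toNat = n.toNat := by omega
    rw [hmaxN]
  · have hn3 : 3 ≤ n := by omega
    obtain ⟨N, rfl⟩ : ∃ N : Nat, n = (N : Int) := ⟨n.toNat, by omega⟩
    have hN3 : 3 ≤ N := by exact_mod_cast hn3
    dsimp only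
    by_cases hd2 : (2 : Int) ∣ (N : Int)
    · -- even
      have hmod : PySem.Int.mod (N : Int) 2 = 0 := (PySem.Int.mod_eq_zero_iff_dvd _ _).mpr hd2
      obtain ⟨K, hK⟩ : ∃ K : Nat, N = 2 * K := by
        obtain ⟨c, hc⟩ := hd2; exact ⟨N / 2, by omega⟩
      subst hK
      have hK2 : 2 ≤ K := by omega
      have hfd : PySem.Int.floordiv ((2 * K : Nat) : Int) 2 = (K : Int) := by
        rw [PySem.Int.floordiv_eq_ediv_of_pos (by omega)]; push_cast; omega
      have hfd1 : PySem.Int.floordiv (((2 * K : Nat) : Int) - 1) 2 = ((K - 1 : Nat) : Int) := by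
        rw [PySem.Int.floordiv_eq_ediv_of_pos (by omega)]
        push_cast [Nat.cast_sub (by omega : 1 ≤ K)]
        omega
      have htd : PySem.Int.truncdiv ((2 * K : Nat) : Int) 2 = (K : Int) := by
        simp [PySem.Int.truncdiv]
      rw [b_norm (2 * K) (K - 1) 2 (by omega) (by omega) hfd1
        (by rw [hfd]; push_cast [Nat.cast_sub (by omega : 1 ≤ K)]; ring)]
      have hKt : ((K : Int) - 1).toNat = K - 1 := by omega
      have hlen : (((2 * K : Nat) : Int) - 2).toNat = 2 * K - 2 := by omega
      simp only [hmod, htd, foldl_const_append, PySem.List.pyRepeat_singleton,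
        PySem.List.length_pyRange_one, Int.sub_zero, hKt, hlen, Int.toNat_natCast]
      simp [List.append_assoc, List.replicate_succ]
    · -- odd
      have hmod : PySem.Int.mod (N : Int) 2 ≠ 0 := fun h =>
        hd2 ((PySem.Int.mod_eq_zero_iff_dvd _ _).mp h)
      obtain ⟨K, hK⟩ : ∃ K : Nat, N = 2 * K + 1 := by
        refine ⟨N / 2, ?_⟩
        by_contra h
        exact hd2 ⟨(N / 2 : Nat), by omega⟩
      subst hK
      have hK1 : 1 ≤ K := by omega
      have hfd : PySem.Int.floordiv ((2 * K + 1 : Nat) : Int) 2 = (K : Int) := by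
        rw [PySem.Int.floordiv_eq_ediv_of_pos (by omega)]; push_cast; omega
      have hfd1 : PySem.Int.floordiv (((2 * K + 1 : Nat) : Int) - 1) 2 = (K : Int) := by
        rw [PySem.Int.floordiv_eq_ediv_of_pos (by omega)]; push_cast; omega
      have htd : PySem.Int.truncdiv ((2 * K + 1 : Nat) : Int) 2 = (K : Int) := by
        simp [PySem.Int.truncdiv]
        rw [Int.tdiv_eq_ediv_of_nonneg (by positivity : (0:Int) ≤ 2 * (K:Int) + 1)]
        omega
      rw [b_norm (2 * K + 1) K 1 (by omega) (by omega) hfd1 (by rw [hfd]; push_cast; ring)]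
      have hlen : (((2 * K + 1 : Nat) : Int) - 2).toNat = 2 * K + 1 - 2 := by omega
      simp only [hmod, htd, foldl_const_append, PySem.List.pyRepeat_singleton,
        PySem.List.length_pyRange_one, Int.sub_zero, hlen, Int.toNat_natCast]
      simp [List.append_assoc, List.replicate_succ]
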